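-- pv_equiv track=rewrite | github.com/paulklemstine/factor | v20_compression_iterate.py | stern_brocot_encode_runlength
-- ===== SOURCE A (Python) =====
-- def stern_brocot_encode_runlength(p, q):
--     if q == 0 or p == 0:
--         return [0]
--     p, q = abs(p), abs(q)
--     runs = []
--     while q > 0:
--         a = p // q
--         runs.append(a)
--         p, q = q, p - a * q
--     return runs
-- ===== SOURCE B (Python) =====
-- def stern_brocot_encode_runlength(p, q):
--     if q == 0 or p == 0:
--         return [0]
--     # Stage 1: materialise the full Euclidean remainder chain r0=|p|, r1=|q|, ...
--     rem = [abs(p), abs(q)]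
--     while rem[-1] > 0:
--         rem.append(rem[-2] % rem[-1])
--     rem.pop()  # drop the terminating 0
--     # Stage 2: the run lengths are the pairwise quotients along the chain
--     return [a // b for a, b in zip(rem, rem[1:])]
-- ===== Notes on version B (the rewrite author's own statement) =====
-- stated objective: alternative
-- what changed: instead of A's single loop that emits each quotient as it goes, B first materialises the full Euclidean remainder chain as a list and then derives the run lengths in a separate pass as pairwise quotients of adjacent remainders (zip/map)
import Mathlib
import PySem

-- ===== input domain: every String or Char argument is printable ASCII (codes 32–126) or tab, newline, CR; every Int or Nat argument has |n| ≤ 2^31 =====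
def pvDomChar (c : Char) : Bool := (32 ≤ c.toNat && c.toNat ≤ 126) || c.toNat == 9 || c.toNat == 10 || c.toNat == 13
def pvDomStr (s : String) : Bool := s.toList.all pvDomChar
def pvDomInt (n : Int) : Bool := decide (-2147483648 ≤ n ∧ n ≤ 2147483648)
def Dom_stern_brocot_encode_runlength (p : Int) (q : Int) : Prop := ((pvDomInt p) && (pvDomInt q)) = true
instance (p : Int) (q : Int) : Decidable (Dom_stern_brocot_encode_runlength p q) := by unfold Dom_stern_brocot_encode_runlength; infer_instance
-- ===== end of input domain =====

-- B replaces A's single quotient-emitting loop by two staged passes: first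
-- materialise the Euclidean remainder chain, then read off the run lengths as
-- pairwise quotients of adjacent remainders (alternative decomposition, same cost).

-- ===== PORT A =====
-- the while loop: state (p, q, runs)
def sbLoopA (p q : Int) (runs : List Int) : List Int :=
  if h : 0 < q then
    sbLoopA q (p - PySem.Int.floordiv p q * q) (runs ++ [PySem.Int.floordiv p q])
  else runs
termination_by q.toNat
decreasing_by
  have h1 : PySem.Int.floordiv p q = p / q := PySem.Int.floordiv_eq_ediv_of_pos h
  have h3 : 0 ≤ p % q := Int.emod_nonneg p (by omega)
  have h4 : p % q < q := Int.emod_lt_of_pos p h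
  have h2 : p - p / q * q = p % q := by rw [Int.emod_def]; ring
  simp only [h1]
  omega

def stern_brocot_encode_runlength (p : Int) (q : Int) : List Int :=
  if q = 0 ∨ p = 0 then [0]
  else sbLoopA |p| |q| []

-- ===== PORT B =====
-- Stage 1 of Source B: the list [r0, r1, ...] grown by 'rem.append(rem[-2] % rem[-1])'
-- while rem[-1] > 0; given the current last two entries (a, b) it produces the
-- rest of the chain including both.
def sbChain (a b : Int) : List Int :=
  a :: (if h : 0 < b then sbChain b (PySem.Int.mod a b) else [b])
termination_by b.toNat
decreasing_by
  have h3 := PySem.Int.mod_nonneg a h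
  have h4 := PySem.Int.mod_lt a h
  omega

def stern_brocot_encode_runlength_alt (p : Int) (q : Int) : List Int :=
  if q = 0 ∨ p = 0 then [0]
  else
    -- rem.pop() drops the trailing 0 → dropLast; rem[1:] → drop 1
    let rem := (sbChain |p| |q|).dropLast
    (rem.zip (rem.drop 1)).map (fun ab => PySem.Int.floordiv ab.1 ab.2)

-- ===== PRECONDITION & SPEC =====
def Spec_stern_brocot_encode_runlength (p : Int) (q : Int) (out : List Int) : Prop := out = stern_brocot_encode_runlength_alt p q
instance (p : Int) (q : Int) (out : List Int) : Decidable (Spec_stern_brocot_encode_runlength p q out) := by unfold Spec_stern_brocot_encode_runlength; infer_instance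

-- ===== CLAIM (what is proved, stated in full; the proofs are below) =====
def Claim_equal_stern_brocot_encode_runlength : Prop := ∀ (p : Int) (q : Int), Dom_stern_brocot_encode_runlength p q → Spec_stern_brocot_encode_runlength p q (stern_brocot_encode_runlength p q)

-- ===== LEMMAS AND PROOFS =====
-- B's second pass, named for the proofs
def sbQuots (xs : List Int) : List Int :=
  (xs.zip (xs.drop 1)).map (fun ab => PySem.Int.floordiv ab.1 ab.2)

theorem sbQuots_cons_cons (x y : Int) (t : List Int) :
    sbQuots (x :: y :: t) = PySem.Int.floordiv x y :: sbQuots (y :: t) := by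
  simp [sbQuots]

theorem sbChain_two (a b : Int) : ∃ t, sbChain a b = a :: b :: t := by
  rw [sbChain]
  by_cases h : 0 < b
  · rw [dif_pos h, sbChain]
    exact ⟨_, rfl⟩
  · rw [dif_neg h]
    exact ⟨[], rfl⟩

theorem sbLoopA_eq_quots_chain (p q : Int) (runs : List Int) :
    sbLoopA p q runs = runs ++ sbQuots ((sbChain p q).dropLast) := by
  fun_induction sbLoopA p q runs with
  | case1 p q runs h ih =>
    have hm : p - PySem.Int.floordiv p q * q = PySem.Int.mod p q := by
      have := PySem.Int.floordiv_mul_add_mod p q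
      omega
    rw [ih, hm]
    conv_rhs => rw [sbChain, dif_pos h]
    obtain ⟨t, ht⟩ := sbChain_two q (PySem.Int.mod p q)
    rw [ht]
    simp only [List.dropLast_cons₂, sbQuots_cons_cons]
    simp
  | case2 p q runs h =>
    rw [sbChain, dif_neg h]
    simp [sbQuots]

-- ===== VERDICT (by name: the statement is the Claim_ definition above) =====
theorem stern_brocot_encode_runlength_spec : Claim_equal_stern_brocot_encode_runlength := by
  intro p q _
  unfold Spec_stern_brocot_encode_runlength stern_brocot_encode_runlength stern_brocot_encode_runlength_alt
  split
  · rfl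
  · rw [sbLoopA_eq_quots_chain]
    simp [sbQuots]
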